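-- pv_equiv track=rewrite | github.com/Kismon/kismon | kismon/client_rest.py | encode_cryptset
-- ===== SOURCE A (Python) =====
-- def get_crypt_list():
--     """see packet_ieee80211.h from kismet-newcore
--     """
--     cryptsets = ["none", "unknown", "wep", "layer3 ", "wep40", "wep104",
--                  "tkip", "wpa", "psk", "aes_ocb", "aes_ccm", "leap", "ttls",
--                  "peap", "pptp", "fortress", "keyguard", "unknown_nonwep",
--                  "wpa_migmode", "version_wpa", "version_wpa2"]
--
--     return cryptsets
--
-- def encode_cryptset(crypts):
--     cryptsets = get_crypt_list()
--     bin_cryptset = []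
--     for crypt in cryptsets:
--         if crypt in crypts:
--             bit = "1"
--         else:
--             bit = "0"
--         bin_cryptset.insert(0, bit)
--     cryptset = int("".join(bin_cryptset[:-1]), 2)
--     return cryptset
-- ===== SOURCE B (Python) =====
-- def get_crypt_list():
--     """see packet_ieee80211.h from kismet-newcore
--     """
--     cryptsets = ["none", "unknown", "wep", "layer3 ", "wep40", "wep104",
--                  "tkip", "wpa", "psk", "aes_ocb", "aes_ccm", "leap", "ttls",
--                  "peap", "pptp", "fortress", "keyguard", "unknown_nonwep",
--                  "wpa_migmode", "version_wpa", "version_wpa2"]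
--
--     return cryptsets
--
-- def encode_cryptset(crypts):
--     cryptsets = get_crypt_list()
--     weights = {cryptsets[i]: 1 << (i - 1) for i in range(1, 21)}
--     cryptset = 0
--     for crypt in crypts:
--         cryptset |= weights.get(crypt, 0)
--     return cryptset
-- ===== Notes on version B (the rewrite author's own statement) =====
-- stated objective: faster
-- what changed: B builds a name-to-bitmask weight table once and ORs dict lookups over the input crypts, instead of scanning the fixed 21-name list with a membership test per name, building a reversed '0'/'1' string and parsing it with int(s, 2).
import Mathlib
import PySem

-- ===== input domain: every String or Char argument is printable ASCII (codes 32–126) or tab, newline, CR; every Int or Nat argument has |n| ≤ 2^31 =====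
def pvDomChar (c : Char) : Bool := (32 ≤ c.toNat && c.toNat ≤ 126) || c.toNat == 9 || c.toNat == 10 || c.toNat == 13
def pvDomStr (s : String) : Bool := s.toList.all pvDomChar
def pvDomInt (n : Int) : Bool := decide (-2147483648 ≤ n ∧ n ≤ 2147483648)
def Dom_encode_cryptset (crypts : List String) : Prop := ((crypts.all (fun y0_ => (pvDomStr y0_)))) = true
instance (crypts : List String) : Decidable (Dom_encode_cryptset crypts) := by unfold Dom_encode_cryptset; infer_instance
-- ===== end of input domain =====

-- B replaces A's fixed-list membership scan + binary-string building/parsing by a weight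
-- table built once and OR-folded lookups over the input (same value; measured faster).


-- ===== PORT A =====
def get_crypt_list : List String :=
  ["none", "unknown", "wep", "layer3 ", "wep40", "wep104",
   "tkip", "wpa", "psk", "aes_ocb", "aes_ccm", "leap", "ttls",
   "peap", "pptp", "fortress", "keyguard", "unknown_nonwep",
   "wpa_migmode", "version_wpa", "version_wpa2"]

-- hand-ported int(s, 2): exact for the string A builds here, which is always a nonempty
-- sequence of '0'/'1' digits with no sign, space, prefix or underscore
def parseBin2 (s : String) : Int :=
  s.toList.foldl (fun a c => 2 * a + (if c = '1' then 1 else 0)) 0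

def encode_cryptset (crypts : List String) : Int :=
  let cryptsets := get_crypt_list
  let bin_cryptset := cryptsets.foldl
    (fun acc crypt =>
      let bit : String := if crypt ∈ crypts then "1" else "0"
      PySem.List.insert acc 0 bit)
    ([] : List String)
  parseBin2 (PySem.Str.join "" (PySem.List.slice bin_cryptset none (some (-1))))

-- ===== PORT B =====
def encode_cryptset_alt (crypts : List String) : Int :=
  let cryptsets := get_crypt_list
  -- {cryptsets[i]: 1 << (i-1) for i in range(1, 21)}; i-1 ≥ 0, so '.toNat' is exact here
  let weights : PySem.Dict String Int :=
    (PySem.List.pyRange 1 21 1).foldl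
      (fun d i => d.insert (PySem.List.pyGetD cryptsets i "") ((1 : Int) <<< (i - 1).toNat))
      PySem.Dict.empty
  crypts.foldl (fun cryptset crypt => PySem.Int.bor cryptset (weights.getD crypt 0)) 0

-- ===== PRECONDITION & SPEC =====
def Spec_encode_cryptset (crypts : List String) (out : Int) : Prop := out = encode_cryptset_alt crypts
instance (crypts : List String) (out : Int) : Decidable (Spec_encode_cryptset crypts out) := by unfold Spec_encode_cryptset; infer_instance

-- ===== CLAIM (what is proved, stated in full; the proofs are below) =====
def Claim_equal_encode_cryptset : Prop := ∀ (crypts : List String), Dom_encode_cryptset crypts → Spec_encode_cryptset crypts (encode_cryptset crypts)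

-- ===== LEMMAS AND PROOFS =====

-- weighted names: the 20 bit-carrying crypt names with their bit positions, descending
def pvWv : List (String × Nat) :=
  [("version_wpa2", 19), ("version_wpa", 18), ("wpa_migmode", 17), ("unknown_nonwep", 16),
   ("keyguard", 15), ("fortress", 14), ("pptp", 13), ("peap", 12), ("ttls", 11),
   ("leap", 10), ("aes_ccm", 9), ("aes_ocb", 8), ("psk", 7), ("wpa", 6), ("tkip", 5),
   ("wep104", 4), ("wep40", 3), ("layer3 ", 2), ("wep", 1), ("unknown", 0)]

-- OR of the weights of all entries of ws whose name is c
def pvW (ws : List (String × Nat)) (c : String) : Nat :=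
  ws.foldr (fun p r => (if p.1 = c then 2 ^ p.2 else 0) ||| r) 0

-- OR of the weights of all entries of ws whose name occurs in crypts
def pvT (ws : List (String × Nat)) (crypts : List String) : Nat :=
  ws.foldr (fun p r => (if p.1 ∈ crypts then 2 ^ p.2 else 0) ||| r) 0

-- the same as a sum
def pvS (ws : List (String × Nat)) (crypts : List String) : Nat :=
  ws.foldr (fun p r => (if p.1 ∈ crypts then 2 ^ p.2 else 0) + r) 0

-- the weight dict B builds (definitionally the dict inside encode_cryptset_alt)
def pvD : PySem.Dict String Int :=
  (PySem.List.pyRange 1 21 1).foldl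
    (fun d i => d.insert (PySem.List.pyGetD get_crypt_list i "") ((1 : Int) <<< (i - 1).toNat))
    PySem.Dict.empty

theorem pvOr3 (a b c : Nat) : (a ||| b) ||| (a ||| c) = a ||| (b ||| c) := by
  apply Nat.eq_of_testBit_eq
  intro j
  simp only [Nat.testBit_or]
  cases a.testBit j <;> simp

theorem pvOrSwap (a b c : Nat) : a ||| (b ||| c) = b ||| (a ||| c) := by
  rw [← Nat.or_assoc, Nat.or_comm a b, Nat.or_assoc]

theorem pvT_nil (ws : List (String × Nat)) : pvT ws [] = 0 := by
  induction ws with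
  | nil => rfl
  | cons p ps ih =>
    simp only [pvT, List.foldr] at ih ⊢
    simp

theorem pvT_cons (ws : List (String × Nat)) (c : String) (rest : List String) :
    pvT ws (c :: rest) = pvW ws c ||| pvT ws rest := by
  induction ws with
  | nil => simp [pvT, pvW]
  | cons p ps ih =>
    simp only [pvT, pvW, List.foldr] at ih ⊢
    rw [ih]
    simp only [List.mem_cons]
    by_cases hq : p.1 = c <;> by_cases hr : p.1 ∈ rest
    · rw [if_pos (Or.inl hq), if_pos hq, if_pos hr]
      exact (pvOr3 _ _ _).symm
    · rw [if_pos (Or.inl hq), if_pos hq, if_neg hr, Nat.zero_or]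
      exact (Nat.or_assoc _ _ _).symm
    · rw [if_pos (Or.inr hr), if_neg hq, if_pos hr, Nat.zero_or]
      exact pvOrSwap _ _ _
    · rw [if_neg (by tauto), if_neg hq, if_neg hr]
      simp

theorem pvFoldOr (ws : List (String × Nat)) (crypts : List String) (a : Nat) :
    crypts.foldl (fun x c => x ||| pvW ws c) a = a ||| pvT ws crypts := by
  induction crypts generalizing a with
  | nil => simp [pvT_nil]
  | cons c rest ih => simp [List.foldl, ih, pvT_cons, Nat.or_assoc]

theorem pvPowOrAdd (k r : Nat) (h : r < 2 ^ k) : 2 ^ k ||| r = 2 ^ k + r := by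
  induction k generalizing r with
  | zero => interval_cases r; rfl
  | succ k ih =>
    have hr : r = Nat.bit (r % 2 = 1) (r / 2) := by
      by_cases h2 : r % 2 = 1 <;> simp [Nat.bit, h2] <;> omega
    have hp : (2 : Nat) ^ (k + 1) = Nat.bit false (2 ^ k) := by simp [Nat.bit]; ring
    have hq : r / 2 < 2 ^ k := by omega
    rw [hr, hp, Nat.lor_bit, ih _ hq]
    by_cases h2 : r % 2 = 1 <;> simp [Nat.bit, h2] <;> omega

theorem pvT_eq_pvS (ws : List (String × Nat)) (crypts : List String) :
    ∀ k : Nat, (k :: ws.map Prod.snd).Pairwise (fun a b => b < a) →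
      pvT ws crypts = pvS ws crypts ∧ pvS ws crypts < 2 ^ k := by
  induction ws with
  | nil =>
    intro k _
    exact ⟨rfl, Nat.two_pow_pos k⟩
  | cons p ps ih =>
    intro k h
    rw [List.map_cons] at h
    rcases List.pairwise_cons.mp h with ⟨hk, htail⟩
    have hpk : p.2 < k := hk _ (by simp)
    obtain ⟨hT, hS⟩ := ih p.2 htail
    have hstepT : pvT (p :: ps) crypts
        = (if p.1 ∈ crypts then 2 ^ p.2 else 0) ||| pvT ps crypts := rfl
    have hstepS : pvS (p :: ps) crypts
        = (if p.1 ∈ crypts then 2 ^ p.2 else 0) + pvS ps crypts := rfl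
    have h2 : (2 : Nat) ^ (p.2 + 1) ≤ 2 ^ k := Nat.pow_le_pow_right (by norm_num) hpk
    rw [pow_succ] at h2
    rw [hstepT, hstepS, hT]
    by_cases hm : p.1 ∈ crypts
    · rw [if_pos hm, pvPowOrAdd _ _ hS]
      exact ⟨rfl, by omega⟩
    · rw [if_neg hm, Nat.zero_or]
      exact ⟨(Nat.zero_add _).symm, by omega⟩

theorem pvLookup (c : String) : pvD.getD c 0 = ((pvW pvWv c : Nat) : Int) := by
  by_cases h1 : c = "unknown"
  · subst h1; decide
  by_cases h2 : c = "wep"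
  · subst h2; decide
  by_cases h3 : c = "layer3 "
  · subst h3; decide
  by_cases h4 : c = "wep40"
  · subst h4; decide
  by_cases h5 : c = "wep104"
  · subst h5; decide
  by_cases h6 : c = "tkip"
  · subst h6; decide
  by_cases h7 : c = "wpa"
  · subst h7; decide
  by_cases h8 : c = "psk"
  · subst h8; decide
  by_cases h9 : c = "aes_ocb"
  · subst h9; decide
  by_cases h10 : c = "aes_ccm"
  · subst h10; decide
  by_cases h11 : c = "leap"
  · subst h11; decide
  by_cases h12 : c = "ttls"
  · subst h12; decide
  by_cases h13 : c = "peap"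
  · subst h13; decide
  by_cases h14 : c = "pptp"
  · subst h14; decide
  by_cases h15 : c = "fortress"
  · subst h15; decide
  by_cases h16 : c = "keyguard"
  · subst h16; decide
  by_cases h17 : c = "unknown_nonwep"
  · subst h17; decide
  by_cases h18 : c = "wpa_migmode"
  · subst h18; decide
  by_cases h19 : c = "version_wpa"
  · subst h19; decide
  by_cases h20 : c = "version_wpa2"
  · subst h20; decide
  have hd : pvD = PySem.Dict.mk [("unknown", 1), ("wep", 2), ("layer3 ", 4), ("wep40", 8), ("wep104", 16), ("tkip", 32), ("wpa", 64), ("psk", 128), ("aes_ocb", 256), ("aes_ccm", 512), ("leap", 1024), ("ttls", 2048), ("peap", 4096), ("pptp", 8192), ("fortress", 16384), ("keyguard", 32768), ("unknown_nonwep", 65536), ("wpa_migmode", 131072), ("version_wpa", 262144), ("version_wpa2", 524288)] := by decide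
  rw [hd]
  simp [PySem.Dict.getD, PySem.Dict.get?, pvW, pvWv, Ne.symm h1, Ne.symm h2, Ne.symm h3, Ne.symm h4, Ne.symm h5, Ne.symm h6, Ne.symm h7, Ne.symm h8, Ne.symm h9, Ne.symm h10, Ne.symm h11, Ne.symm h12, Ne.symm h13, Ne.symm h14, Ne.symm h15, Ne.symm h16, Ne.symm h17, Ne.symm h18, Ne.symm h19, Ne.symm h20]

theorem pvAltFold (crypts : List String) (a : Nat) :
    crypts.foldl (fun acc c => PySem.Int.bor acc (pvD.getD c 0)) ((a : Nat) : Int)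
      = ((crypts.foldl (fun x c => x ||| pvW pvWv c) a : Nat) : Int) := by
  induction crypts generalizing a with
  | nil => rfl
  | cons c rest ih =>
    rw [List.foldl_cons, List.foldl_cons, pvLookup, PySem.Int.bor_natCast]
    exact ih (a ||| pvW pvWv c)

theorem pvAlt_eq (crypts : List String) :
    encode_cryptset_alt crypts = ((pvT pvWv crypts : Nat) : Int) := by
  have h0 : encode_cryptset_alt crypts
      = crypts.foldl (fun acc c => PySem.Int.bor acc (pvD.getD c 0)) ((0 : Nat) : Int) := rfl
  rw [h0, pvAltFold, pvFoldOr, Nat.zero_or]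

theorem pvIteSingleton (p : Prop) [Decidable p] (a b : Char) :
    (if p then [a] else [b]) = [if p then a else b] := by split <;> rfl

theorem pvToListIteStr (p : Prop) [Decidable p] :
    (if p then "1" else "0").toList = if p then ['1'] else ['0'] := by split <;> rfl

theorem pvBitVal (p : Prop) [Decidable p] :
    (if (if p then '1' else '0') = '1' then (1 : Int) else 0) = if p then 1 else 0 := by
  split <;> simp

theorem pvA_eq (crypts : List String) :
    encode_cryptset crypts = ((pvS pvWv crypts : Nat) : Int) := by
  simp only [encode_cryptset, get_crypt_list, List.foldl, PySem.List.insert_zero,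
    PySem.List.slice_to_neg_one, List.dropLast, parseBin2, PySem.Str.toList_join,
    show ("" : String).toList = [] from rfl, List.map, pvToListIteStr, pvIteSingleton,
    PySem.Chars.join_cons_cons, PySem.Chars.join_singleton, List.nil_append, List.cons_append,
    pvBitVal, pvS, pvWv, List.foldr, Nat.cast_add, apply_ite (fun n : Nat => (n : Int)),
    Nat.cast_pow, Nat.cast_ofNat, Nat.cast_zero]
  ring_nf
  simp only [ite_mul, one_mul, zero_mul]
  ring

-- ===== VERDICT (by name: the statement is the Claim_ definition above) =====
theorem encode_cryptset_spec : Claim_equal_encode_cryptset := by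
  intro crypts _
  unfold Spec_encode_cryptset
  rw [pvA_eq, pvAlt_eq, (pvT_eq_pvS pvWv crypts 20 (by decide)).1]
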